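-- pv_equiv track=rewrite | github.com/PizzaBoii/Spotify | spotify_reader.py | biggest_area
-- ===== SOURCE A (Python) =====
-- def biggest_area(areas,num):
--     new_areas=areas.copy()
--     list = []
--     if new_areas != []:
--         for w in range (num):
--             mx = max(new_areas)
--             for i in range (len(new_areas)):
--                 if new_areas[i]>-1:
--                     if new_areas!=[]:
--                             if new_areas[i] == mx:
--                                 new_areas[i]=-99
--                                 list.append(i)
--     return (list)
-- ===== SOURCE B (Python) =====
-- def biggest_area(areas, num):
--     # Single pass: group indices by nonnegative value, then emit groups in
--     # descending value order, one distinct value per requested round.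
--     if num <= 0:
--         return []
--     groups = {}
--     for i, v in enumerate(areas):
--         if v > -1:
--             groups.setdefault(v, []).append(i)
--     out = []
--     for v in sorted(groups, reverse=True)[:num]:
--         out.extend(groups[v])
--     return out
-- ===== Notes on version B (the rewrite author's own statement) =====
-- stated objective: faster
-- what changed: A repeatedly rescans the whole list (max + full index scan) once per requested round, marking taken entries with -99; B makes one grouping pass that buckets indices by nonnegative value in a dict, sorts the distinct values descending once, and concatenates the first num buckets.
import Mathlib
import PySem

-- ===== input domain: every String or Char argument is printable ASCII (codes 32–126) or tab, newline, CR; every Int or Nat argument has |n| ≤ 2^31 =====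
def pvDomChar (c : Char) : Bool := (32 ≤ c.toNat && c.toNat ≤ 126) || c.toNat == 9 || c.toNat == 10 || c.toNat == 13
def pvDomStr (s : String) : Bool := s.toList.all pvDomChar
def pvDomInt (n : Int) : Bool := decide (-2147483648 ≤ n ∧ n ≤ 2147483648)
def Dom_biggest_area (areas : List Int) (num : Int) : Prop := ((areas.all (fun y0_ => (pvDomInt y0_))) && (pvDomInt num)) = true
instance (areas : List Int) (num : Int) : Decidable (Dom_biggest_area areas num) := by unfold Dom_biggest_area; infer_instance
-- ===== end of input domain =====

-- B replaces A's repeated max-scan rounds by one grouping pass over the values plus one sort of the distinct nonnegative values (objective: faster).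

-- ===== PORT A =====
def innerStep (mx : Int) (st : List Int × List Int) (i : Int) : List Int × List Int :=
  if PySem.List.pyGetD st.1 i 0 > -1 then
    if st.1 ≠ [] then
      if PySem.List.pyGetD st.1 i 0 = mx then
        (PySem.List.pySetD st.1 i (-99), st.2 ++ [i])
      else st
    else st
  else st

def outerStep (st : List Int × List Int) (_w : Int) : List Int × List Int :=
  let mx := (PySem.List.max? st.1 (fun y => y)).getD 0
  (PySem.List.pyRange 0 (PySem.List.len st.1) 1).foldl (innerStep mx) st

def biggest_area (areas : List Int) (num : Int) : List Int :=
  if areas ≠ [] then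
    ((PySem.List.pyRange 0 num 1).foldl outerStep (areas, [])).2
  else []

-- ===== PORT B =====
def biggest_area_alt (areas : List Int) (num : Int) : List Int :=
  if num ≤ 0 then []
  else
    let groups : PySem.Dict Int (List Int) :=
      (PySem.List.enumerate areas 0).foldl
        (fun d p => if p.2 > -1 then d.modify p.2 [] (· ++ [p.1]) else d)
        PySem.Dict.empty
    (PySem.List.slice (PySem.List.sorted groups.keys (fun y => y) true) none (some num)).foldl
      (fun out v => out ++ groups.getD v []) []


-- ===== PRECONDITION & SPEC =====
def Spec_biggest_area (areas : List Int) (num : Int) (out : List Int) : Prop := out = biggest_area_alt areas num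
instance (areas : List Int) (num : Int) (out : List Int) : Decidable (Spec_biggest_area areas num out) := by unfold Spec_biggest_area; infer_instance

-- ===== CLAIM (what is proved, stated in full; the proofs are below) =====
def Claim_equal_biggest_area : Prop := ∀ (areas : List Int) (num : Int), Dom_biggest_area areas num → Spec_biggest_area areas num (biggest_area areas num)

-- ===== LEMMAS AND PROOFS =====

def mark (mx : Int) (l : List Int) : List Int :=
  l.map (fun v => if -1 < v ∧ v = mx then -99 else v)

def sel (mx : Int) (s : Int) (cur : List Int) : List Int :=
  ((PySem.List.enumerate cur s).filter (fun p => decide (-1 < p.2) && (p.2 == mx))).map (·.1)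

def dvals (l : List Int) : List Int :=
  PySem.List.sorted (PySem.Set.ofList (l.filter (fun v => decide (-1 < v)))) (fun y => y) true

-- desc sorted = asc sorted by negated key
theorem sortedDesc_eq_neg (X : List Int) :
    PySem.List.sorted X (fun y => y) true = PySem.List.sorted X (fun y => -y) false := by
  simp only [PySem.List.sorted]
  congr 1
  funext a b
  simp

theorem sortedDesc_eq (X ys : List Int) (h : ys.Perm X)
    (hp : ys.Pairwise (fun a b => b < a)) :
    PySem.List.sorted X (fun y => y) true = ys := by
  rw [sortedDesc_eq_neg]
  exact PySem.List.sorted_eq_of_perm_of_pairwise_lt X ys (fun y => -y) h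
    (by refine hp.imp ?_; intro a b hab; simp only []; omega)

theorem sortedDesc_pairwise (X : List Int) (h : X.Nodup) :
    (PySem.List.sorted X (fun y => y) true).Pairwise (fun a b => b < a) := by
  rw [sortedDesc_eq_neg]
  have hp := PySem.List.sorted_pairwise X (fun y => -y)
  have hnd : (PySem.List.sorted X (fun y => -y) false).Nodup :=
    (PySem.List.sorted_perm X (fun y => -y) false).nodup_iff.mpr h
  have := hp.and (List.Pairwise.imp (fun hab => hab) hnd)
  refine this.imp ?_
  rintro a b ⟨h1, h2⟩
  omega

theorem mem_filter_mark (mx : Int) (l : List Int) (v : Int) :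
    v ∈ (mark mx l).filter (fun y => decide (-1 < y)) ↔
      (v ∈ l.filter (fun y => decide (-1 < y)) ∧ v ≠ mx) := by
  simp only [mark, List.mem_filter, List.mem_map, decide_eq_true_eq]
  constructor
  · rintro ⟨⟨x, hx, hfx⟩, hv⟩
    by_cases hc : -1 < x ∧ x = mx
    · simp [hc] at hfx; omega
    · simp [hc] at hfx
      subst hfx
      exact ⟨⟨hx, hv⟩, fun he => hc ⟨hv, he⟩⟩
  · rintro ⟨⟨hx, hv⟩, hne⟩
    refine ⟨⟨v, hx, ?_⟩, hv⟩
    simp [hne]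

theorem mem_dvals (l : List Int) (v : Int) :
    v ∈ dvals l ↔ v ∈ l.filter (fun y => decide (-1 < y)) := by
  rw [dvals, (PySem.List.sorted_perm _ (fun y : Int => y) true).mem_iff,
    PySem.Set.mem_ofList]

theorem nodup_dvals (l : List Int) : (dvals l).Nodup :=
  (PySem.List.sorted_perm _ (fun y : Int => y) true).nodup_iff.mpr
    (PySem.Set.nodup_ofList _)

theorem dvals_step (l : List Int) (mx : Int) (hmx : -1 < mx) (hmem : mx ∈ l)
    (hmax : ∀ y ∈ l, y ≤ mx) :
    dvals l = mx :: dvals (mark mx l) := by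
  conv_lhs => rw [dvals]
  apply sortedDesc_eq
  · -- Perm
    have hnd1 : (PySem.Set.ofList (l.filter (fun v => decide (-1 < v)))).Nodup :=
      PySem.Set.nodup_ofList _
    have hnd2 : (mx :: dvals (mark mx l)).Nodup := by
      refine List.nodup_cons.mpr ⟨?_, nodup_dvals _⟩
      intro hc
      rw [mem_dvals, mem_filter_mark] at hc
      exact hc.2 rfl
    rw [List.perm_ext_iff_of_nodup hnd2 hnd1]
    intro a
    rw [List.mem_cons, PySem.Set.mem_ofList, mem_dvals, mem_filter_mark]
    simp only [List.mem_filter, decide_eq_true_eq]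
    constructor
    · rintro (rfl | ⟨⟨ha, hv⟩, _⟩)
      · exact ⟨hmem, hmx⟩
      · exact ⟨ha, hv⟩
    · rintro ⟨ha, hv⟩
      by_cases he : a = mx
      · exact Or.inl he
      · exact Or.inr ⟨⟨ha, hv⟩, he⟩
  · -- Pairwise
    refine List.pairwise_cons.mpr ⟨?_, ?_⟩
    · intro v hv
      rw [mem_dvals, mem_filter_mark, List.mem_filter] at hv
      exact lt_of_le_of_ne (hmax v hv.1.1) hv.2
    · exact sortedDesc_pairwise _ (PySem.Set.nodup_ofList _)

theorem dvals_nil_of_neg (l : List Int) (hall : ∀ y ∈ l, y ≤ -1) : dvals l = [] := by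
  unfold dvals
  have : l.filter (fun v => decide (-1 < v)) = [] := by
    rw [List.filter_eq_nil_iff]
    intro a ha
    simpa using not_lt.mpr (hall a ha)
  rw [this]
  rfl

theorem mark_id_of_neg (l : List Int) (mx : Int) (hmx : mx ≤ -1) : mark mx l = l := by
  simp only [mark]
  conv_rhs => rw [← List.map_id l]
  apply List.map_congr_left
  intro a _
  rw [if_neg]
  · rfl
  · rintro ⟨h1, h2⟩
    omega

theorem sel_cons (v s x : Int) (cs : List Int) :
    sel v s (x :: cs) = (if -1 < x ∧ x = v then [s] else []) ++ sel v (s + 1) cs := by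
  simp only [sel, PySem.List.enumerate_cons, List.filter_cons]
  by_cases hc : -1 < x ∧ x = v
  · obtain ⟨h1, rfl⟩ := hc
    simp [h1]
  · rw [if_neg hc]
    have : (decide (-1 < x) && (x == v)) = false := by
      simp only [Bool.and_eq_false_iff, decide_eq_false_iff_not, beq_eq_false_iff_ne]
      omega
    simp [this]

theorem sel_mark (v mx : Int) (hne : v ≠ mx) (l : List Int) :
    ∀ (s : Int), sel v s (mark mx l) = sel v s l := by
  induction l with
  | nil => intro s; rfl
  | cons x cs ih =>
    intro s
    simp only [mark, List.map_cons]
    rw [sel_cons, sel_cons]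
    by_cases hc : -1 < x ∧ x = mx
    · rw [if_pos hc]
      have h1 : ¬(-1 < (-99 : Int) ∧ (-99 : Int) = v) := by omega
      have h2 : ¬(-1 < x ∧ x = v) := by rintro ⟨_, rfl⟩; exact hne hc.2
      rw [if_neg h1, if_neg h2]
      exact congrArg _ (ih (s + 1))
    · rw [if_neg hc]
      rw [show sel v (s+1) (List.map (fun w => if -1 < w ∧ w = mx then -99 else w) cs)
            = sel v (s+1) (mark mx cs) from rfl, ih (s + 1)]

theorem sel_nil_of_neg (v s : Int) (l : List Int) (hall : ∀ y ∈ l, y ≤ -1) :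
    sel v s l = [] := by
  induction l generalizing s with
  | nil => rfl
  | cons x cs ih =>
    rw [sel_cons, if_neg, ih (s+1) (fun y hy => hall y (List.mem_cons_of_mem _ hy))]
    · rfl
    · have := hall x (List.mem_cons_self ..)
      omega


theorem inner_eq (mx : Int) (cur : List Int) : ∀ (pre acc : List Int),
    (PySem.List.pyRange (pre.length : Int) ((pre.length : Int) + (cur.length : Int)) 1).foldl
        (innerStep mx) (pre ++ cur, acc)
      = (pre ++ mark mx cur, acc ++ sel mx (pre.length : Int) cur) := by
  induction cur with
  | nil =>
    intro pre acc
    simp only [List.length_nil, Nat.cast_zero, add_zero, List.append_nil]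
    rw [PySem.List.pyRange_one_eq_nil le_rfl]
    simp [mark, sel, PySem.List.enumerate_nil]
  | cons x cs ih =>
    intro pre acc
    have hlt : (pre.length : Int) < (pre.length : Int) + ((x :: cs).length : Int) := by
      simp only [List.length_cons]
      push_cast
      omega
    rw [PySem.List.pyRange_one_cons hlt, List.foldl_cons]
    have hget : PySem.List.pyGetD (pre ++ x :: cs) ((pre.length : Int)) 0 = x := by
      rw [PySem.List.pyGetD_natCast]
      simp
    have hbound : (pre.length : Int) + ((x :: cs).length : Int)
        = ((pre.length : Int) + 1) + (cs.length : Int) := by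
      simp only [List.length_cons]
      push_cast
      omega
    by_cases hc : -1 < x ∧ x = mx
    · have hstep : innerStep mx (pre ++ x :: cs, acc) (pre.length : Int)
          = ((pre ++ [-99]) ++ cs, acc ++ [(pre.length : Int)]) := by
        simp only [innerStep, hget]
        rw [if_pos hc.1, if_pos (by simp), if_pos hc.2]
        simp [PySem.List.pySetD_natCast, List.set_append_right]
      rw [hstep, hbound]
      have hlen : ((pre ++ [(-99 : Int)]).length : Int) = (pre.length : Int) + 1 := by
        simp
      have h2 := ih (pre ++ [-99]) (acc ++ [(pre.length : Int)])
      rw [hlen] at h2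
      rw [h2, sel_cons, if_pos hc]
      simp only [mark, List.map_cons, if_pos hc]
      simp
  -- skip case
    · have hstep : innerStep mx (pre ++ x :: cs, acc) (pre.length : Int)
          = ((pre ++ [x]) ++ cs, acc) := by
        simp only [innerStep, hget]
        by_cases h1 : -1 < x
        · have h2 : ¬ x = mx := fun h => hc ⟨h1, h⟩
          rw [if_pos h1, if_pos (by simp), if_neg h2]
          simp
        · rw [if_neg h1]
          simp
      rw [hstep, hbound]
      have hlen : ((pre ++ [x]).length : Int) = (pre.length : Int) + 1 := by simp
      have h2 := ih (pre ++ [x]) acc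
      rw [hlen] at h2
      rw [h2, sel_cons, if_neg hc]
      simp only [mark, List.map_cons, if_neg hc]
      simp

def roundsA : Nat → List Int × List Int → List Int × List Int
  | 0, st => st
  | n + 1, st => roundsA n (outerStep st 0)

theorem foldl_outerStep (l : List Int) : ∀ st, l.foldl outerStep st = roundsA l.length st := by
  induction l with
  | nil => intro st; rfl
  | cons x xs ih =>
    intro st
    rw [List.foldl_cons, ih (outerStep st x)]
    rfl

def Bres (n : Nat) (l : List Int) : List Int :=
  ((dvals l).take n).flatMap (fun v => sel v 0 l)

theorem outerStep_eq (x : Int) (t acc : List Int) (w : Int) :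
    outerStep (x :: t, acc) w
      = (mark (t.foldl max x) (x :: t), acc ++ sel (t.foldl max x) 0 (x :: t)) := by
  unfold outerStep
  rw [PySem.List.max?_id_cons]
  simp only [Option.getD_some, PySem.List.len_eq]
  have h2 := inner_eq (t.foldl max x) (x :: t) [] acc
  simp only [List.length_nil, Nat.cast_zero, zero_add, List.nil_append] at h2
  exact h2

theorem rounds_eq : ∀ (n : Nat) (l acc : List Int), (roundsA n (l, acc)).2 = acc ++ Bres n l := by
  intro n
  induction n with
  | zero => intro l acc; simp [roundsA, Bres]
  | succ n ih =>
    intro l acc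
    cases l with
    | nil =>
      have hid : outerStep ([], acc) 0 = ([], acc) := by rfl
      rw [show roundsA (n + 1) ([], acc) = roundsA n (outerStep ([], acc) 0) from rfl, hid,
        ih [] acc]
      simp [Bres, dvals, PySem.List.sorted]
    | cons x t =>
      have hmax : ∀ y ∈ x :: t, y ≤ t.foldl max x := by
        intro y hy
        rcases List.mem_cons.mp hy with rfl | hy
        · exact (PySem.List.le_foldl_max t y).1
        · exact (PySem.List.le_foldl_max t x).2 y hy
      rw [show roundsA (n + 1) (x :: t, acc) = roundsA n (outerStep (x :: t, acc) 0) from rfl,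
        outerStep_eq, ih]
      by_cases hpos : -1 < t.foldl max x
      · have hmem : t.foldl max x ∈ x :: t := by
          rcases PySem.List.foldl_max_mem t x with h | h
          · rw [h]; exact List.mem_cons_self ..
          · exact List.mem_cons_of_mem _ h
        rw [show Bres (n + 1) (x :: t)
            = ((dvals (x :: t)).take (n + 1)).flatMap (fun v => sel v 0 (x :: t)) from rfl,
          dvals_step _ _ hpos hmem hmax, List.take_succ_cons, List.flatMap_cons,
          List.append_assoc]
        congr 1
        congr 1
        rw [Bres]
        apply List.flatMap_congr
        intro v hv
        have hv2 : v ∈ dvals (mark (t.foldl max x) (x :: t)) := List.mem_of_mem_take hv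
        rw [mem_dvals, mem_filter_mark] at hv2
        exact sel_mark v _ hv2.2 (x :: t) 0
      · have hall : ∀ y ∈ x :: t, y ≤ -1 := fun y hy => by
          have := hmax y hy
          omega
        rw [mark_id_of_neg _ _ (by omega), sel_nil_of_neg _ _ _ hall]
        simp [Bres, dvals_nil_of_neg _ hall]

theorem A_eq_Bres (areas : List Int) (num : Int) :
    biggest_area areas num = Bres num.toNat areas := by
  unfold biggest_area
  by_cases h : areas ≠ []
  · rw [if_pos h, foldl_outerStep, PySem.List.length_pyRange_one]
    simp only [sub_zero]
    rw [rounds_eq num.toNat areas []]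
    simp
  · rw [if_neg h]
    push Not at h
    subst h
    simp [Bres, dvals, PySem.List.sorted]

theorem groups_mapsnd (areas : List Int) :
    ((PySem.List.enumerate areas 0).filter (fun p => decide (p.2 > -1))).map (fun p => p.2)
      = areas.filter (fun v => decide (-1 < v)) := by
  rw [← PySem.List.map_snd_enumerate areas 0, List.filter_map]
  simp [Function.comp_def]

theorem groups_fold_filter (areas : List Int) :
    (PySem.List.enumerate areas 0).foldl
        (fun (d : PySem.Dict Int (List Int)) p =>
          if p.2 > -1 then d.modify p.2 [] (· ++ [p.1]) else d)
        PySem.Dict.empty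
      = ((PySem.List.enumerate areas 0).filter (fun p => decide (p.2 > -1))).foldl
          (fun (d : PySem.Dict Int (List Int)) p => d.modify p.2 [] (· ++ [p.1]))
          PySem.Dict.empty :=
  PySem.List.foldl_ite_eq_foldl_filter _ _ _ _

theorem groups_keys (areas : List Int) :
    ((PySem.List.enumerate areas 0).foldl
        (fun (d : PySem.Dict Int (List Int)) p =>
          if p.2 > -1 then d.modify p.2 [] (· ++ [p.1]) else d)
        PySem.Dict.empty).keys
      = PySem.Set.ofList (areas.filter (fun v => decide (-1 < v))) := by
  rw [groups_fold_filter,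
    PySem.Dict.keys_foldl_modify_key _ (fun p : Int × Int => p.2) []
      (fun _ p => (· ++ [p.1])) PySem.Dict.empty]
  rw [groups_mapsnd]
  simp [PySem.Set.update_nil_left]

theorem groups_getD (areas : List Int) (v : Int) :
    ((PySem.List.enumerate areas 0).foldl
        (fun (d : PySem.Dict Int (List Int)) p =>
          if p.2 > -1 then d.modify p.2 [] (· ++ [p.1]) else d)
        PySem.Dict.empty).getD v []
      = sel v 0 areas := by
  rw [groups_fold_filter,
    show (fun (d : PySem.Dict Int (List Int)) (p : Int × Int) => d.modify p.2 [] (· ++ [p.1]))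
      = (fun d p => (fun d (q : Int × Int) => d.modify q.1 [] (· ++ [q.2])) d (Prod.swap p))
      from rfl,
    ← List.foldl_map (f := Prod.swap)
      (g := fun (d : PySem.Dict Int (List Int)) (q : Int × Int) => d.modify q.1 [] (· ++ [q.2])),
    PySem.Dict.getD_foldl_modify_append]
  simp only [PySem.Dict.getD_empty, List.nil_append, List.filter_map, List.map_map, sel]
  rw [List.filter_filter]
  congr 1
  apply List.filter_congr
  intro p _
  simp [Bool.and_comm]

theorem alt_eq_Bres (areas : List Int) (num : Int) :
    biggest_area_alt areas num = Bres num.toNat areas := by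
  unfold biggest_area_alt
  by_cases hn : num ≤ 0
  · rw [if_pos hn]
    have h0 : num.toNat = 0 := by omega
    rw [h0]
    simp [Bres]
  · rw [if_neg hn]
    simp only [groups_keys, groups_getD]
    have hd : PySem.List.sorted (PySem.Set.ofList (areas.filter (fun v => decide (-1 < v))))
        (fun y => y) true = dvals areas := rfl
    rw [hd]
    rw [PySem.List.slice_to (dvals areas) (show (0:Int) ≤ num by omega)]
    rw [PySem.List.foldl_append_eq_flatMap]
    simp only [List.nil_append, Bres]

-- ===== VERDICT (by name: the statement is the Claim_ definition above) =====
theorem biggest_area_spec : Claim_equal_biggest_area := by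
  intro areas num _
  unfold Spec_biggest_area
  rw [A_eq_Bres, alt_eq_Bres]
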